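-- pv_equiv track=rewrite | github.com/delmedigo88/SpaceGenerator | SpaceGenerator.py | sliding_window_future
-- ===== SOURCE A (Python) =====
-- def sliding_window_future(arr, window_size = 3):
--   '''
--   Returns the future sliding window of the given array and window size
--   '''
--   arr = list(arr)
--   seq = []
--   for i in range(len(arr)):
--     p = arr[i:i+window_size]
--     if window_size - len(p) ==0:
--       seq.append(p)
--     else:
--       seq.append(p + [-1] * (window_size - len(p)))
--   return seq
-- ===== SOURCE B (Python) =====
-- def sliding_window_future(arr, window_size=3):
--     arr = list(arr)
--     rows = [[] for _ in arr]
--     for j in range(max(window_size, 0)):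
--         col = arr[j:] + [-1] * min(j, len(arr))
--         for r, x in zip(rows, col):
--             r.append(x)
--     return rows
-- ===== Notes on version B (the rewrite author's own statement) =====
-- stated objective: alternative
-- what changed: Builds the result column-wise: starts from one empty row per element and, for each window offset j, appends the j-shifted padded column elementwise (zip), instead of A's row-wise loop that slices and conditionally pads each window.
-- intended difference: For negative window_size whose magnitude is smaller than the array length, A's slice arr[i:i+window_size] hits Python's negative-index wraparound and returns truncated non-empty leading windows, while B returns the intended empty window at every position since a non-positive window size selects nothing. — e.g. on sliding_window_future([1, 2], -1): A returns [[1], []], B returns [[], []]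
import Mathlib
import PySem

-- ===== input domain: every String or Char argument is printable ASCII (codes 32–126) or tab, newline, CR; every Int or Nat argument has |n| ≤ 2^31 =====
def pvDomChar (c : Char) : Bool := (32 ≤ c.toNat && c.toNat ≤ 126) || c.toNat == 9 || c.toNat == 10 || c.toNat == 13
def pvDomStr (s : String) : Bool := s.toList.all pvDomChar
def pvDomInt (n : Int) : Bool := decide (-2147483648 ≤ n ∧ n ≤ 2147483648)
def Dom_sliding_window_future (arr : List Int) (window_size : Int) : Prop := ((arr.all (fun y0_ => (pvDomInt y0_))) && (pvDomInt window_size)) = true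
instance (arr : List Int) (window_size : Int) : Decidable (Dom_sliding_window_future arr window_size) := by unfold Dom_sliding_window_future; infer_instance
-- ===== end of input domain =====

-- B builds the result column-wise (one shifted padded column per window offset,
-- zipped onto the rows) instead of A's row-wise slice-and-pad loop (alternative
-- decomposition, same cost).

-- ===== PORT A =====
-- literal port of A: loop over range(len(arr)); p = arr[i:i+window_size];
-- branch on 'window_size - len(p) == 0'; append p or p + [-1]*(window_size-len(p)).
def sliding_window_future (arr : List Int) (window_size : Int) : List (List Int) :=
  (PySem.List.pyRange 0 (arr.length : Int) 1).foldl
    (fun seq i =>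
      let p := PySem.List.slice arr (some i) (some (i + window_size))
      if window_size - (p.length : Int) = 0 then
        seq ++ [p]
      else
        seq ++ [p ++ List.replicate (window_size - (p.length : Int)).toNat (-1)])
    []

-- ===== PORT B =====
-- literal port of B: rows = [[] for _ in arr]; for j in range(max(window_size, 0)):
--   col = arr[j:] + [-1] * min(j, len(arr)); for r, x in zip(rows, col): r.append(x)
-- (the in-place append loop over zip(rows, col) is transcribed as the functional
--  elementwise append over rows.zip col)
def sliding_window_future_alt (arr : List Int) (window_size : Int) : List (List Int) :=
  (PySem.List.pyRange 0 (max window_size 0) 1).foldl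
    (fun rows j =>
      let col := PySem.List.slice arr (some j) none
        ++ List.replicate (min j (arr.length : Int)).toNat (-1)
      (rows.zip col).map (fun rx => rx.1 ++ [rx.2]))
    (arr.map (fun _ => []))

-- ===== PRECONDITION & SPEC =====
-- For negative window_size whose magnitude is smaller than the array length, A's
-- slice arr[i:i+window_size] hits Python's negative-index wraparound and returns
-- truncated non-empty leading windows, while B returns the intended empty window
-- at every position since a non-positive window size selects nothing.
def D_sliding_window_future (arr : List Int) (window_size : Int) : Prop :=
  window_size < 0 ∧ 0 < (arr.length : Int) + window_size
instance (arr : List Int) (window_size : Int) : Decidable (D_sliding_window_future arr window_size) := by unfold D_sliding_window_future; infer_instance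

def Spec_sliding_window_future (arr : List Int) (window_size : Int) (out : List (List Int)) : Prop := ¬ D_sliding_window_future arr window_size → out = sliding_window_future_alt arr window_size
instance (arr : List Int) (window_size : Int) (out : List (List Int)) : Decidable (Spec_sliding_window_future arr window_size out) := by unfold Spec_sliding_window_future; infer_instance

def pvDiffWitness_sliding_window_future : List Int × Int := ([1, 2], -1)
def pvDiffWitnessOut_sliding_window_future : (List (List Int)) × (List (List Int)) :=
  ([[1], []], [[], []])

-- ===== CLAIM (what is proved, stated in full; the proofs are below) =====
def Claim_unchanged_sliding_window_future : Prop := ∀ (arr : List Int) (window_size : Int), Dom_sliding_window_future arr window_size → Spec_sliding_window_future arr window_size (sliding_window_future arr window_size)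
def Claim_changed_sliding_window_future : Prop := Dom_sliding_window_future (pvDiffWitness_sliding_window_future.1) (pvDiffWitness_sliding_window_future.2) ∧ D_sliding_window_future (pvDiffWitness_sliding_window_future.1) (pvDiffWitness_sliding_window_future.2) ∧ sliding_window_future (pvDiffWitness_sliding_window_future.1) (pvDiffWitness_sliding_window_future.2) = pvDiffWitnessOut_sliding_window_future.1 ∧ sliding_window_future_alt (pvDiffWitness_sliding_window_future.1) (pvDiffWitness_sliding_window_future.2) = pvDiffWitnessOut_sliding_window_future.2 ∧ pvDiffWitnessOut_sliding_window_future.1 ≠ pvDiffWitnessOut_sliding_window_future.2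
def Claim_exact_sliding_window_future : Prop := ∀ (arr : List Int) (window_size : Int), Dom_sliding_window_future arr window_size → D_sliding_window_future arr window_size → sliding_window_future arr window_size ≠ sliding_window_future_alt arr window_size

-- ===== LEMMAS AND PROOFS =====

-- A's row function: the slice, padded with -1 up to window_size.
def rowA (arr : List Int) (ws i : Int) : List Int :=
  let p := PySem.List.slice arr (some i) (some (i + ws))
  p ++ List.replicate (ws - (p.length : Int)).toNat (-1)

lemma A_eq_map (arr : List Int) (ws : Int) :
    sliding_window_future arr ws
      = (List.range arr.length).map (fun (k : Nat) => rowA arr ws (k : Int)) := by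
  unfold sliding_window_future
  have hfun :
      (fun (seq : List (List Int)) i =>
        let p := PySem.List.slice arr (some i) (some (i + ws))
        if ws - (p.length : Int) = 0 then seq ++ [p]
        else seq ++ [p ++ List.replicate (ws - (p.length : Int)).toNat (-1)])
      = fun (seq : List (List Int)) i => seq ++ [rowA arr ws i] := by
    funext seq i
    simp only [rowA]
    split_ifs with h
    · simp [h]
    · rfl
  rw [hfun, PySem.List.foldl_append_singleton_eq_map, List.nil_append,
      PySem.List.pyRange_one, List.map_map]
  simp only [Int.sub_zero, Int.toNat_natCast]
  apply List.map_congr_left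
  intro k _
  simp

lemma col_getElem (arr : List Int) (k i : Nat)
    (h : i < (arr.drop k ++ List.replicate (min k arr.length) (-1 : Int)).length) :
    (arr.drop k ++ List.replicate (min k arr.length) (-1 : Int))[i]
      = arr.getD (i + k) (-1) := by
  by_cases hk : k + i < arr.length
  · rw [List.getElem_append_left (by simp; omega), List.getElem_drop,
        List.getD_eq_getElem arr (-1) (by omega)]
    congr 1
    omega
  · rw [List.getElem_append_right (by simp; omega), List.getElem_replicate,
        List.getD_eq_default arr (-1) (by omega)]

-- B's init is one empty row per element
lemma init_rows (arr : List Int) :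
    arr.map (fun _ => ([] : List Int)) = (List.range arr.length).map (fun _ => []) := by
  apply List.ext_getElem <;> simp

-- invariant of B's column fold: after k columns, row i holds offsets 0..k-1
lemma B_fold_inv (arr : List Int) (k : Nat) :
    (PySem.List.pyRange 0 (k : Int) 1).foldl
      (fun rows j =>
        let col := PySem.List.slice arr (some j) none
          ++ List.replicate (min j (arr.length : Int)).toNat (-1)
        (rows.zip col).map (fun rx => rx.1 ++ [rx.2]))
      (arr.map (fun _ => []))
    = (List.range arr.length).map
        (fun (i : Nat) => (List.range k).map (fun j => arr.getD (i + j) (-1))) := by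
  induction k with
  | zero =>
      rw [show ((0 : Nat) : Int) = 0 from rfl, PySem.List.pyRange_one_eq_nil (le_refl 0),
          List.foldl_nil, init_rows]
      simp
  | succ k ih =>
      have hcast : ((k + 1 : Nat) : Int) = (k : Int) + 1 := by push_cast; ring
      rw [hcast, PySem.List.pyRange_one_succ_right (by omega), List.foldl_append, ih]
      simp only [List.foldl_cons, List.foldl_nil]
      rw [PySem.List.slice_from_natCast]
      have hmin : (min ((k : Nat) : Int) ((arr.length : Nat) : Int)).toNat
          = min k arr.length := by omega
      rw [hmin]
      apply List.ext_getElem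
      · simp
        omega
      · intro i h1 h2
        have hi : i < arr.length := by
          simpa using h2
        rw [List.getElem_map, List.getElem_zip, List.getElem_map,
            List.getElem_range, col_getElem arr k i, List.getElem_map,
            List.getElem_range, List.range_succ, List.map_append]
        simp

-- per-row agreement for positive window size
lemma row_eq (arr : List Int) (w i : Nat) (hi : i < arr.length) :
    rowA arr (w : Int) (i : Int)
      = (List.range w).map (fun j => arr.getD (i + j) (-1)) := by
  unfold rowA
  have hslice : PySem.List.slice arr (some (i : Int)) (some ((i : Int) + (w : Int)))
      = (arr.drop i).take w := PySem.List.slice_natCast_add arr i w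
  rw [hslice]
  have hlen : ((arr.drop i).take w).length = min w (arr.length - i) := by simp
  apply List.ext_getElem
  · simp
    omega
  · intro m h1 h2
    have hm : m < w := by
      simp at h1
      omega
    rw [List.getElem_map, List.getElem_range]
    by_cases hc : m < arr.length - i
    · rw [List.getElem_append_left (by simp; omega)]
      rw [List.getElem_take, List.getElem_drop,
          List.getD_eq_getElem arr (-1) (by omega)]
    · rw [List.getElem_append_right (by simp; omega)]
      rw [List.getElem_replicate,
          List.getD_eq_default arr (-1) (by omega)]

-- rows are empty on both sides when window_size ≤ 0 outside D_
lemma rowA_nil (arr : List Int) (ws : Int) (i : Nat)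
    (hws : ws ≤ 0) (hnd : ws = 0 ∨ (arr.length : Int) + ws ≤ 0) (hi : i < arr.length) :
    rowA arr ws (i : Int) = [] := by
  unfold rowA
  have hlen : (PySem.List.slice arr (some (i : Int)) (some ((i : Int) + ws))).length = 0 := by
    rw [PySem.List.length_slice]
    have h1 : PySem.List.clampIdx arr.length ((i : Nat) : Int) = min i arr.length :=
      PySem.List.clampIdx_natCast arr.length i
    have h2 : PySem.List.clampIdx arr.length ((i : Int) + ws) ≤ i := by
      simp only [PySem.List.clampIdx]
      split_ifs <;> omega
    omega
  have hnil : PySem.List.slice arr (some (i : Int)) (some ((i : Int) + ws)) = [] :=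
    List.length_eq_zero_iff.mp hlen
  simp only [hnil, List.length_nil, List.nil_append, Int.natCast_zero]
  have : (ws - 0).toNat = 0 := by omega
  rw [this]
  rfl

lemma core (arr : List Int) (ws : Int) (hnd : ¬ D_sliding_window_future arr ws) :
    sliding_window_future arr ws = sliding_window_future_alt arr ws := by
  unfold sliding_window_future_alt D_sliding_window_future at *
  rw [A_eq_map]
  by_cases hws : 0 < ws
  · have hmax : max ws 0 = ws := by omega
    have hw : ws = ((ws.toNat : Nat) : Int) := by omega
    rw [hmax, hw, B_fold_inv]
    apply List.map_congr_left
    intro i hi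
    rw [List.mem_range] at hi
    exact row_eq arr ws.toNat i hi
  · have hmax : max ws 0 = 0 := by omega
    rw [hmax, PySem.List.pyRange_one_eq_nil (le_refl 0), List.foldl_nil, init_rows]
    apply List.map_congr_left
    intro i hi
    rw [List.mem_range] at hi
    apply rowA_nil arr ws i (by omega) _ hi
    by_cases h0 : ws = 0
    · exact Or.inl h0
    · refine Or.inr ?_
      by_contra hc
      exact hnd ⟨by omega, by omega⟩

-- ===== VERDICT (by name: the statements are the Claim_ definitions above) =====
theorem sliding_window_future_spec : Claim_unchanged_sliding_window_future := by
  intro arr ws _ hnd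
  exact core arr ws hnd

theorem sliding_window_future_changed : Claim_changed_sliding_window_future := by
  unfold Claim_changed_sliding_window_future; decide

theorem sliding_window_future_tight : Claim_exact_sliding_window_future := by
  intro arr ws _ hd heq
  obtain ⟨hws, hn⟩ := hd
  have hn0 : 0 < arr.length := by omega
  have hmax : max ws 0 = 0 := by omega
  have hB : sliding_window_future_alt arr ws
      = (List.range arr.length).map (fun _ => ([] : List Int)) := by
    unfold sliding_window_future_alt
    rw [hmax, PySem.List.pyRange_one_eq_nil (le_refl 0), List.foldl_nil, init_rows]
  rw [A_eq_map, hB] at heq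
  have h0 : ((List.range arr.length).map (fun (k : Nat) => rowA arr ws (k : Int)))[0]?
      = ((List.range arr.length).map (fun _ => ([] : List Int)))[0]? := by rw [heq]
  rw [List.getElem?_map, List.getElem?_map, List.getElem?_range hn0] at h0
  simp only [Option.map_some] at h0
  have h0' : rowA arr ws ((0 : Nat) : Int) = [] := Option.some.inj h0
  have hlen : (PySem.List.slice arr (some ((0 : Nat) : Int)) (some (((0 : Nat) : Int) + ws))).length ≠ 0 := by
    rw [PySem.List.length_slice]
    have h2 : PySem.List.clampIdx arr.length (((0 : Nat) : Int) + ws)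
        = ((arr.length : Int) + ws).toNat := by
      simp only [PySem.List.clampIdx]
      split_ifs <;> omega
    have h3 : PySem.List.clampIdx arr.length ((0 : Nat) : Int) = 0 := by
      simp only [PySem.List.clampIdx]
      split_ifs <;> omega
    omega
  unfold rowA at h0'
  rcases List.append_eq_nil_iff.mp h0' with ⟨hp, _⟩
  exact hlen (by rw [hp]; rfl)
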